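-- pv_equiv track=rewrite | github.com/RyannDaGreat/rp | rp_ptpython/bash_selection.py | get_bash_comment_block_spans
-- ===== SOURCE A (Python) =====
-- from typing import List, Tuple, Optional, Set
--
-- def get_bash_comment_block_spans(code: str) -> Set[Tuple[int, int]]:
--     """Spans for contiguous comment blocks."""
--     spans, offset, start, end = set(), 0, None, None
--     for line in code.split('\n'):
--         stripped = line.strip()
--         if stripped.startswith('#') and not stripped.startswith('#!'):
--             if start is None:
--                 start = offset
--             end = offset + len(line)
--         elif start is not None:
--             spans.add((start, end))
--             start = None
--         offset += len(line) + 1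
--     if start is not None:
--         spans.add((start, end))
--     return spans
-- ===== SOURCE B (Python) =====
-- def get_bash_comment_block_spans(code):
--     """Spans for contiguous comment blocks."""
--     # Pass 1: one record (is_comment, line_start, line_end) per line.
--     recs = []
--     off = 0
--     for line in code.split('\n'):
--         s = line.strip()
--         recs.append((s.startswith('#') and not s.startswith('#!'),
--                      off, off + len(line)))
--         off += len(line) + 1
--     # Pass 2: group maximal runs of equal flags; emit a span per comment run.
--     spans = set()
--     i = 0
--     n = len(recs)
--     while i < n:
--         j = i
--         while j + 1 < n and recs[j + 1][0] == recs[i][0]: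
--             j += 1
--         if recs[i][0]:
--             spans.add((recs[i][1], recs[j][2]))
--         i = j + 1
--     return spans
-- ===== Notes on version B (the rewrite author's own statement) =====
-- stated objective: alternative
-- what changed: B replaces A's single-pass start/end state machine with two passes: it first materialises a per-line record list (is_comment, line_start, line_end) with a running offset, then groups maximal runs of equal flags and emits one span per comment run.
import Mathlib
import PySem

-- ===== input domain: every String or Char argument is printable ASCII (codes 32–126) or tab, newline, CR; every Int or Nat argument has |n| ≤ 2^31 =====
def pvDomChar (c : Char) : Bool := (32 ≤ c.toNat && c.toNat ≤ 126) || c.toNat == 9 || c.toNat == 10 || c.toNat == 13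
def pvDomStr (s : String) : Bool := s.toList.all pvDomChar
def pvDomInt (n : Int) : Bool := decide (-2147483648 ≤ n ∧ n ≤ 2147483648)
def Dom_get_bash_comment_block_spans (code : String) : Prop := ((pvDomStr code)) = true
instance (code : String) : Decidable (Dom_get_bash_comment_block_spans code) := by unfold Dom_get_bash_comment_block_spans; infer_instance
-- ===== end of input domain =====

-- B changes the decomposition: a per-line record list plus run-grouping instead of A's
-- start/end state-machine fold; same O(n) cost, equal return value (proved below).

-- ===== PORT A =====
-- state = (spans, offset, start, end); start/end are Option Int as in Python (None = not in a block).
def pvGoA : List String →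
    PySem.Set (Int × Int) × Int × Option Int × Option Int →
    PySem.Set (Int × Int) × Int × Option Int × Option Int
  | [], st => st
  | line :: rest, (spans, offset, start, stop) =>
    let stripped := PySem.Str.strip line
    let st' :=
      if PySem.Str.startswith stripped "#" && !PySem.Str.startswith stripped "#!" then
        (spans, offset + PySem.Str.len line + 1,
          (if start.isNone then some offset else start), some (offset + PySem.Str.len line))
      else if start.isSome then
        -- Python adds (start, end); here start is some _, and end is some _ too
        -- (it was set with start), so getD 0 never fires its default.
        (PySem.Set.add spans (start.getD 0, stop.getD 0),
          offset + PySem.Str.len line + 1, none, stop)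
      else
        (spans, offset + PySem.Str.len line + 1, start, stop)
    pvGoA rest st'

-- the trailing 'if start is not None: spans.add((start, end))'
def pvFinishA (st : PySem.Set (Int × Int) × Int × Option Int × Option Int) :
    PySem.Set (Int × Int) :=
  match st with
  | (spans, _, start, stop) =>
    if start.isSome then PySem.Set.add spans (start.getD 0, stop.getD 0) else spans

def get_bash_comment_block_spans (code : String) : List (Int × Int) :=
  pvFinishA (pvGoA ((PySem.Str.split? code "\n").getD []) (PySem.Set.empty, 0, none, none))

-- ===== PORT B =====
-- pass 1: one record (is_comment, line_start, line_end) per line, with running offset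
def pvRecords : List String → Int → List (Bool × Int × Int)
  | [], _ => []
  | line :: rest, off =>
    let s := PySem.Str.strip line
    (PySem.Str.startswith s "#" && !PySem.Str.startswith s "#!", off, off + PySem.Str.len line)
      :: pvRecords rest (off + PySem.Str.len line + 1)

-- the inner while loop: split off the maximal run whose flag equals k
def pvTakeRun (k : Bool) : List (Bool × Int × Int) →
    List (Bool × Int × Int) × List (Bool × Int × Int)
  | [] => ([], [])
  | r :: rs =>
    if r.1 == k then
      let p := pvTakeRun k rs
      (r :: p.1, p.2)
    else ([], r :: rs)

theorem pvTakeRun_snd_length_le (k : Bool) :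
    ∀ rs : List (Bool × Int × Int), (pvTakeRun k rs).2.length ≤ rs.length
  | [] => Nat.le_refl _
  | r :: rs => by
    simp only [pvTakeRun]
    split
    · exact Nat.le_trans (pvTakeRun_snd_length_le k rs) (Nat.le_succ _)
    · simp

-- pass 2: the outer while loop over runs
def pvGoB : List (Bool × Int × Int) → PySem.Set (Int × Int) → PySem.Set (Int × Int)
  | [], spans => spans
  | r :: rs, spans =>
    let p := pvTakeRun r.1 rs
    pvGoB p.2
      (if r.1 then PySem.Set.add spans (r.2.1, (List.getLastD p.1 r).2.2) else spans)
termination_by rs _ => rs.length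
decreasing_by exact Nat.lt_succ_of_le (pvTakeRun_snd_length_le _ _)

def get_bash_comment_block_spans_alt (code : String) : List (Int × Int) :=
  pvGoB (pvRecords ((PySem.Str.split? code "\n").getD []) 0) PySem.Set.empty

-- ===== PRECONDITION & SPEC =====
def Spec_get_bash_comment_block_spans (code : String) (out : List (Int × Int)) : Prop := out = get_bash_comment_block_spans_alt code
instance (code : String) (out : List (Int × Int)) : Decidable (Spec_get_bash_comment_block_spans code out) := by unfold Spec_get_bash_comment_block_spans; infer_instance

-- ===== CLAIM (what is proved, stated in full; the proofs are below) =====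
def Claim_equal_get_bash_comment_block_spans : Prop := ∀ (code : String), Dom_get_bash_comment_block_spans code → Spec_get_bash_comment_block_spans code (get_bash_comment_block_spans code)

-- ===== LEMMAS AND PROOFS =====

-- pvGoB skips a leading run of non-comment records
theorem pvGoB_skip_false (recs : List (Bool × Int × Int)) (spans : PySem.Set (Int × Int)) :
    pvGoB ((pvTakeRun false recs).2) spans = pvGoB recs spans := by
  cases recs with
  | nil => rfl
  | cons r rs =>
    by_cases h : r.1 = false
    · rw [pvGoB]
      simp [pvTakeRun, h]
    · simp [pvTakeRun, h]

theorem getLastD_snd_snd_eq (g : List (Bool × Int × Int)) (d d' : Bool × Int × Int)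
    (h : d.2.2 = d'.2.2) : (List.getLastD g d).2.2 = (List.getLastD g d').2.2 := by
  cases g with
  | nil => exact h
  | cons x xs => simp [List.getLastD]

-- the combined invariant: closed state (start = none) and open state (start = some s, end = some e)
theorem pvGoA_pvGoB (ls : List String) :
    (∀ (off : Int) (spans : PySem.Set (Int × Int)) (stop : Option Int),
      pvFinishA (pvGoA ls (spans, off, none, stop)) = pvGoB (pvRecords ls off) spans) ∧
    (∀ (off : Int) (spans : PySem.Set (Int × Int)) (s e : Int),
      pvFinishA (pvGoA ls (spans, off, some s, some e)) =
        pvGoB ((pvTakeRun true (pvRecords ls off)).2)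
          (PySem.Set.add spans
            (s, (List.getLastD (pvTakeRun true (pvRecords ls off)).1 (true, 0, e)).2.2))) := by
  induction ls with
  | nil =>
    constructor
    · intro off spans stop
      simp [pvGoA, pvFinishA, pvRecords, pvGoB]
    · intro off spans s e
      simp [pvGoA, pvFinishA, pvRecords, pvGoB, pvTakeRun, List.getLastD]
  | cons l ls ih =>
    obtain ⟨ihC, ihO⟩ := ih
    by_cases hc : (PySem.Str.startswith (PySem.Str.strip l) "#" &&
        !PySem.Str.startswith (PySem.Str.strip l) "#!") = true
    · constructor
      · intro off spans stop
        rw [pvGoA]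
        simp only [hc, if_true, Option.isNone_none]
        rw [ihO (off + PySem.Str.len l + 1) spans off (off + PySem.Str.len l)]
        rw [pvRecords]
        simp only [hc]
        rw [pvGoB]
        simp only [pvTakeRun, beq_self_eq_true, if_true, List.getLastD_cons]
        rw [getLastD_snd_snd_eq (pvTakeRun true (pvRecords ls (off + PySem.Str.len l + 1))).1
          (true, 0, off + PySem.Str.len l) (true, off, off + PySem.Str.len l) rfl]
      · intro off spans s e
        rw [pvGoA]
        simp only [hc, if_true, Option.isNone_some, Bool.false_eq_true, if_false]
        rw [ihO (off + PySem.Str.len l + 1) spans s (off + PySem.Str.len l)]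
        rw [pvRecords]
        simp only [hc]
        simp only [pvTakeRun, beq_self_eq_true, if_true, List.getLastD_cons]
        rw [getLastD_snd_snd_eq (pvTakeRun true (pvRecords ls (off + PySem.Str.len l + 1))).1
          (true, 0, off + PySem.Str.len l) (true, off, off + PySem.Str.len l) rfl]
    · constructor
      · intro off spans stop
        rw [pvGoA]
        simp only [hc, Bool.false_eq_true, if_false, Option.isSome_none]
        rw [ihC (off + PySem.Str.len l + 1) spans stop]
        rw [pvRecords]
        simp only [hc]
        rw [pvGoB]
        simp only [Bool.false_eq_true, if_false]
        rw [← pvGoB_skip_false (pvRecords ls (off + PySem.Str.len l + 1)) spans]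
      · intro off spans s e
        rw [pvGoA]
        simp only [hc, Bool.false_eq_true, if_false, Option.isSome_some, if_true,
          Option.getD_some]
        rw [ihC (off + PySem.Str.len l + 1) (PySem.Set.add spans (s, e)) (some e)]
        rw [pvRecords]
        simp only [hc]
        simp only [pvTakeRun, beq_iff_eq, Bool.false_eq_true, if_false, List.getLastD_nil]
        rw [pvGoB]
        simp only [Bool.false_eq_true, if_false]
        rw [← pvGoB_skip_false (pvRecords ls (off + PySem.Str.len l + 1)) (PySem.Set.add spans (s, e))]

-- ===== VERDICT (by name: the statement is the Claim_ definition above) =====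
theorem get_bash_comment_block_spans_spec : Claim_equal_get_bash_comment_block_spans := by
  intro code _
  unfold Spec_get_bash_comment_block_spans get_bash_comment_block_spans get_bash_comment_block_spans_alt
  exact (pvGoA_pvGoB ((PySem.Str.split? code "\n").getD [])).1 0 PySem.Set.empty none
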